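-- pv_equiv track=rewrite | github.com/JoodSaeed/Ciphers-Project | ciphers/ciphers.py | x_duplicates
-- ===== SOURCE A (Python) =====
-- def x_duplicates(s):
--     result = ""
--     prev_char = None
--     for char in s:
--         if char == prev_char:
--             result += "X"
--         result += char
--         prev_char = char
--     return result
-- ===== SOURCE B (Python) =====
-- from itertools import groupby
--
--
-- def x_duplicates(s):
--     return "".join("X".join(list(g)) for _, g in groupby(s))
-- ===== Notes on version B (the rewrite author's own statement) =====
-- stated objective: idiomatic
-- what changed: Replaces the running prev_char comparison and incremental string concatenation with itertools.groupby: the string is split into maximal runs of equal characters and each run is rendered with 'X'.join, then all runs are concatenated.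
import Mathlib
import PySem

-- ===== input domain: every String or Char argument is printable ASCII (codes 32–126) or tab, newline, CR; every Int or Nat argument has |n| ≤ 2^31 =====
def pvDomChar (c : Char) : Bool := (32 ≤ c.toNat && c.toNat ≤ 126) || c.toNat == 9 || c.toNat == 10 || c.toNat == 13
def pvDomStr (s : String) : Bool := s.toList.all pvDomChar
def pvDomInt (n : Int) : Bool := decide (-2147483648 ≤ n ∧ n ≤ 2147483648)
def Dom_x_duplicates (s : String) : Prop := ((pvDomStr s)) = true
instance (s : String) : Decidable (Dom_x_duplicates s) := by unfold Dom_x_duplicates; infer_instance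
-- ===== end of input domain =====

-- B replaces A's running prev_char comparison with an itertools.groupby decomposition
-- into maximal runs of equal characters, each rendered with "X".join (objective: idiomatic).

-- ===== PORT A =====
-- A's loop: result accumulator, prev_char state; 'result += "X"' when char == prev_char.
def xdupGo : List Char → Option Char → List Char → List Char
  | [], _, result => result
  | c :: cs, prev, result =>
    let r := if some c = prev then result ++ ['X'] else result
    xdupGo cs (some c) (r ++ [c])

def x_duplicates (s : String) : String := String.ofList (xdupGo s.toList none [])

-- ===== PORT B =====
-- groupby(s): take the maximal run of the leading character, emit "X".join(run), recurse.
def xAltGo : List Char → List Char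
  | [] => []
  | c :: cs =>
    PySem.Chars.join ['X'] ((c :: cs.takeWhile (· = c)).map ([·])) ++ xAltGo (cs.dropWhile (· = c))
termination_by l => l.length
decreasing_by
  simp only [List.length_cons]
  exact Nat.lt_succ_of_le (List.length_dropWhile_le _ _)

def x_duplicates_alt (s : String) : String := String.ofList (xAltGo s.toList)

-- ===== PRECONDITION & SPEC =====
def Spec_x_duplicates (s : String) (out : String) : Prop := out = x_duplicates_alt s
instance (s : String) (out : String) : Decidable (Spec_x_duplicates s out) := by unfold Spec_x_duplicates; infer_instance

-- ===== CLAIM (what is proved, stated in full; the proofs are below) =====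
def Claim_equal_x_duplicates : Prop := ∀ (s : String), Dom_x_duplicates s → Spec_x_duplicates s (x_duplicates s)

-- ===== LEMMAS AND PROOFS =====

-- A's loop with the accumulator pulled out
theorem xdupGo_acc (l : List Char) (p : Option Char) (acc : List Char) :
    xdupGo l p acc = acc ++ xdupGo l p [] := by
  induction l generalizing p acc with
  | nil => simp [xdupGo]
  | cons c cs ih =>
    simp only [xdupGo]
    rw [ih, ih]
    by_cases h : some c = p <;> simp only [h, if_pos] <;>
      (conv_rhs => rw [ih]) <;> simp

theorem xdupGo_cons (c : Char) (cs : List Char) (p : Option Char) :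
    xdupGo (c :: cs) p [] =
      (if some c = p then ['X', c] else [c]) ++ xdupGo cs (some c) [] := by
  simp only [xdupGo]
  rw [xdupGo_acc]
  by_cases h : some c = p <;> simp [h]

-- "X".join over a run of singletons
theorem join_run (c : Char) (run : List Char) :
    PySem.Chars.join ['X'] ((c :: run).map ([·])) =
      c :: run.flatMap (fun d => ['X', d]) := by
  induction run generalizing c with
  | nil => simp [PySem.Chars.join_singleton]
  | cons d ds ih =>
    simp only [List.map_cons] at ih ⊢
    rw [PySem.Chars.join_cons_cons, ih d]
    simp

-- A's loop absorbs a run of copies of its prev character, emitting 'X'+char each time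
theorem xdupGo_run (run rest : List Char) (c : Char) (h : ∀ d ∈ run, d = c) :
    xdupGo (run ++ rest) (some c) [] =
      run.flatMap (fun d => ['X', d]) ++ xdupGo rest (some c) [] := by
  induction run with
  | nil => simp
  | cons d ds ih =>
    have hdc : d = c := h d (by simp)
    have h' : ∀ e ∈ ds, e = c := fun e he => h e (by simp [he])
    subst hdc
    rw [List.cons_append, xdupGo_cons, ih h']
    simp

-- main induction: when prev does not match the head, A's loop = B's groupby scan
theorem xdupGo_eq_alt : ∀ (n : ℕ) (l : List Char) (p : Option Char),
    l.length ≤ n → (∀ h, l.head? = some h → p ≠ some h) →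
    xdupGo l p [] = xAltGo l := by
  intro n
  induction n with
  | zero =>
    intro l p hl _
    have : l = [] := List.eq_nil_of_length_eq_zero (Nat.le_zero.mp hl)
    subst this; simp [xdupGo, xAltGo]
  | succ n ih =>
    intro l p hl hp
    cases l with
    | nil => simp [xdupGo, xAltGo]
    | cons c cs =>
      have hpc : ¬ some c = p := fun h => hp c rfl h.symm
      rw [xdupGo_cons, if_neg hpc]
      have hsplit : cs = cs.takeWhile (· = c) ++ cs.dropWhile (· = c) :=
        (List.takeWhile_append_dropWhile).symm
      have hrun : ∀ d ∈ cs.takeWhile (· = c), d = c := by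
        intro d hd
        have := List.mem_takeWhile_imp hd
        simpa using this
      have hrest : xdupGo (cs.dropWhile (· = c)) (some c) [] = xAltGo (cs.dropWhile (· = c)) := by
        apply ih _ (some c)
        · calc (cs.dropWhile (· = c)).length ≤ cs.length := List.length_dropWhile_le _ _
            _ ≤ n := by simpa using Nat.succ_le_succ_iff.mp hl
        · intro h hh heq
          have hc : h = c := Option.some.inj heq.symm
          subst hc
          have := List.head?_dropWhile_not (· = h) cs
          rw [hh] at this
          simp at this
      conv_lhs => rw [hsplit]
      rw [xdupGo_run _ _ c hrun, hrest]
      show ([c] ++ _) ++ _ = xAltGo (c :: cs)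
      rw [xAltGo, join_run]
      simp

-- ===== VERDICT (by name: the statement is the Claim_ definition above) =====
theorem x_duplicates_spec : Claim_equal_x_duplicates := by
  intro s _
  unfold Spec_x_duplicates x_duplicates x_duplicates_alt
  rw [xdupGo_eq_alt s.toList.length s.toList none le_rfl (fun _ _ => by simp)]
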